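-- pv_equiv track=rewrite | github.com/Thunno/Thunno2 | src/build/lib/thunno2/helpers.py | prime_factor_exponents
-- ===== SOURCE A (Python) =====
-- def is_prime(n):
--     i = int(n)
--     return int(i >= 2 and all(i % k for k in range(2, i)))
--
-- def prime_factors(n):
--     n = int(n)
--     for i in range(2, n + 1):
--         if is_prime(i) and n % i == 0:
--             return [i] + prime_factors(n // i)
--     return []
--
-- def prime_factor_exponents(n):
--     p = prime_factors(n)
--     r = []
--     for i in range(n + 1):
--         if is_prime(i):
--             r.append(p.count(i))
--     x = r[::-1]
--     for k, j in enumerate(x):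
--         if j:
--             return x[k:][::-1]
--     return []
-- ===== SOURCE B (Python) =====
-- def _is_prime(i):
--     if i < 2:
--         return False
--     d = 2
--     while d * d <= i:
--         if i % d == 0:
--             return False
--         d += 1
--     return True
--
-- def prime_factor_exponents(n):
--     if n < 2:
--         return []
--     exps = {}
--     m = n
--     d = 2
--     while d * d <= m:
--         while m % d == 0:
--             exps[d] = exps.get(d, 0) + 1
--             m //= d
--         d += 1
--     if m > 1:
--         exps[m] = exps.get(m, 0) + 1
--     biggest = max(exps)
--     out = []
--     for i in range(2, biggest + 1):
--         if _is_prime(i):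
--             out.append(exps.get(i, 0))
--     return out
-- ===== Notes on version B (the rewrite author's own statement) =====
-- stated objective: faster
-- what changed: A factors n by recursive smallest-prime search with an O(i) primality test per candidate and then counts each prime's occurrences over all integers up to n; B trial-divides n only up to its square root collecting exponents in a dict, and emits exponents only for primes up to the largest prime factor using sqrt-bounded primality tests.
import Mathlib
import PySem

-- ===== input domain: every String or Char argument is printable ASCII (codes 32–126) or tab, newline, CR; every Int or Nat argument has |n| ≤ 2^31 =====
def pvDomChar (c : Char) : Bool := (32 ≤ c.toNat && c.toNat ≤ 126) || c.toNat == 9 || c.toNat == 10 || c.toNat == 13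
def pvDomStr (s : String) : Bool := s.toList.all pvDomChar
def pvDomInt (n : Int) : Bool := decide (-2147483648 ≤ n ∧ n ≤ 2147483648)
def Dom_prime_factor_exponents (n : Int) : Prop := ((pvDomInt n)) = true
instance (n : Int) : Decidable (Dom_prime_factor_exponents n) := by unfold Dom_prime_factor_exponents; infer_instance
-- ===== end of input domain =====

-- B replaces A's quadratic scans (per-number O(i) primality, recursive smallest-prime factoring,
-- counting over the factor list for every prime up to n) by trial division to √n collecting
-- exponents in a dict, then emitting exponents only up to the largest prime factor with √i
-- primality tests; objective: faster.

-- ===== PORT A =====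
-- is_prime(n): int(i >= 2 and all(i % k for k in range(2, i)))
def is_prime (n : Int) : Int :=
  if (decide (2 ≤ n) && (PySem.List.pyRange 2 n).all (fun k => PySem.Int.mod n k != 0)) then 1 else 0

-- prime_factors(n), a fuel-guarded transliteration of the recursion (the for-loop with an
-- early return is find?); fuel n.toNat suffices since each recursive call divides n by ≥ 2.
def prime_factors_fuel : Nat → Int → List Int
  | 0, _ => []
  | fuel+1, n =>
    match (PySem.List.pyRange 2 (n+1)).find?
        (fun i => is_prime i != 0 && PySem.Int.mod n i == 0) with
    | some i => i :: prime_factors_fuel fuel (PySem.Int.floordiv n i)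
    | none => []

def prime_factors (n : Int) : List Int := prime_factors_fuel n.toNat n

def prime_factor_exponents (n : Int) : List Int :=
  let p := prime_factors n
  let r := (PySem.List.pyRange 0 (n+1)).foldl
    (fun r i => if is_prime i != 0 then r ++ [(PySem.List.count p i : Int)] else r) []
  let x := r.reverse
  -- for k, j in enumerate(x): if j: return x[k:][::-1]  (k ≥ 0, so x[k:] is drop k)
  match (PySem.List.enumerate x).find? (fun kj => kj.2 != 0) with
  | some kj => (x.drop kj.1.toNat).reverse
  | none => []

-- ===== PORT B =====
-- _is_prime(i): trial division while d*d <= i; fuel-guarded while loop (fuel i.toNat+1 suffices)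
def is_prime_alt_loop : Nat → Int → Int → Bool
  | 0, _, _ => true
  | fuel+1, i, d =>
    if d * d ≤ i then
      if PySem.Int.mod i d == 0 then false
      else is_prime_alt_loop fuel i (d+1)
    else true

def is_prime_alt (i : Int) : Bool :=
  if i < 2 then false else is_prime_alt_loop (i.toNat + 1) i 2

-- inner while: while m % d == 0: exps[d] = exps.get(d,0)+1; m //= d
def b_inner : Nat → Int → Int → PySem.Dict Int Int → Int × PySem.Dict Int Int
  | 0, m, _, exps => (m, exps)
  | fuel+1, m, d, exps =>
    if PySem.Int.mod m d == 0 then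
      b_inner fuel (PySem.Int.floordiv m d) d (exps.insert d (exps.getD d 0 + 1))
    else (m, exps)

-- outer while: while d*d <= m: (inner); d += 1
def b_outer : Nat → Int → Int → PySem.Dict Int Int → Int × PySem.Dict Int Int
  | 0, m, _, exps => (m, exps)
  | fuel+1, m, d, exps =>
    if d * d ≤ m then
      b_outer fuel (b_inner m.toNat m d exps).1 (d+1) (b_inner m.toNat m d exps).2
    else (m, exps)

def prime_factor_exponents_alt (n : Int) : List Int :=
  if n < 2 then []
  else
    let r := b_outer (n.toNat + 1) n 2 PySem.Dict.empty
    let exps := if 1 < r.1 then r.2.insert r.1 (r.2.getD r.1 0 + 1) else r.2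
    -- biggest = max(exps)  (n ≥ 2 guarantees exps is nonempty; none is unreachable)
    match PySem.List.max? exps.keys (fun x => x) with
    | some biggest =>
        (PySem.List.pyRange 2 (biggest+1)).foldl
          (fun out i => if is_prime_alt i then out ++ [exps.getD i 0] else out) []
    | none => []

-- ===== PRECONDITION & SPEC =====
def Spec_prime_factor_exponents (n : Int) (out : List Int) : Prop := out = prime_factor_exponents_alt n
instance (n : Int) (out : List Int) : Decidable (Spec_prime_factor_exponents n out) := by unfold Spec_prime_factor_exponents; infer_instance

-- ===== CLAIM (what is proved, stated in full; the proofs are below) =====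
def Claim_equal_prime_factor_exponents : Prop := ∀ (n : Int), Dom_prime_factor_exponents n → Spec_prime_factor_exponents n (prime_factor_exponents n)

-- ===== LEMMAS AND PROOFS =====

-- A's primality test decides "2 ≤ i and i is prime".
lemma is_prime_eq (i : Int) : (is_prime i != 0) = decide (2 ≤ i ∧ i.toNat.Prime) := by
  unfold is_prime
  by_cases h2 : 2 ≤ i
  · have hi : ((i.toNat : Int)) = i := Int.toNat_of_nonneg (by omega)
    by_cases hp : i.toNat.Prime
    · have hall : (PySem.List.pyRange 2 i).all (fun k => PySem.Int.mod i k != 0) = true := by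
        rw [List.all_eq_true]
        intro k hk
        rw [PySem.List.mem_pyRange_one] at hk
        simp only [bne_iff_ne, ne_eq]
        intro hmod
        rw [PySem.Int.mod_eq_zero_iff_dvd] at hmod
        have hk0 : ((k.toNat : Int)) = k := Int.toNat_of_nonneg (by omega)
        rw [← hk0, ← hi, Int.natCast_dvd_natCast] at hmod
        exact (Nat.prime_def_lt'.mp hp).2 k.toNat (by omega) (by omega) hmod
      simp [h2, hall, hp]
    · have : ¬ (PySem.List.pyRange 2 i).all (fun k => PySem.Int.mod i k != 0) = true := by
        intro hall
        rw [List.all_eq_true] at hall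
        apply hp
        rw [Nat.prime_def_lt']
        refine ⟨by omega, fun m hm2 hmlt hdvd => ?_⟩
        have hmem : (m : Int) ∈ PySem.List.pyRange 2 i := by
          rw [PySem.List.mem_pyRange_one]; omega
        have := hall _ hmem
        simp only [bne_iff_ne, ne_eq] at this
        apply this
        rw [PySem.Int.mod_eq_zero_iff_dvd, ← hi]
        exact_mod_cast hdvd
      have hall : (PySem.List.pyRange 2 i).all (fun k => PySem.Int.mod i k != 0) = false :=
        Bool.eq_false_iff.mpr this
      simp [h2, hall, hp]
  · simp [h2]

lemma is_prime_alt_loop_eq (fuel : Nat) (i d : Int) (hd : 2 ≤ d)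
    (hfuel : i.toNat + 2 ≤ fuel + d.toNat) :
    (is_prime_alt_loop fuel i d = true) ↔ (∀ k : Int, d ≤ k → k * k ≤ i → ¬ (k ∣ i)) := by
  induction fuel generalizing d with
  | zero =>
    simp only [is_prime_alt_loop, true_iff]
    intro k hk hkk
    exfalso
    have h1 : i < d := by omega
    have : k ≤ k * k := le_mul_of_one_le_left (by omega) (by omega)
    omega
  | succ fuel ih =>
    simp only [is_prime_alt_loop]
    by_cases hdd : d * d ≤ i
    · rw [if_pos hdd]
      by_cases hmod : PySem.Int.mod i d = 0
      · have hm : (PySem.Int.mod i d == 0) = true := by rw [beq_iff_eq]; exact hmod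
        rw [PySem.Int.mod_eq_zero_iff_dvd] at hmod
        rw [hm]
        rw [if_pos rfl]
        constructor
        · intro h; cases h
        · intro h; exact absurd hmod (h d le_rfl hdd)
      · have : (PySem.Int.mod i d == 0) = false := by simpa using hmod
        rw [this]
        simp only [Bool.false_eq_true, if_false]
        rw [ih (d+1) (by omega) (by omega)]
        constructor
        · intro h k hk hkk
          rcases eq_or_lt_of_le hk with rfl | hlt
          · rw [← PySem.Int.mod_eq_zero_iff_dvd]; exact hmod
          · exact h k (by omega) hkk
        · intro h k hk hkk; exact h k (by omega) hkk
    · rw [if_neg hdd]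
      simp only [true_iff]
      intro k hk hkk
      exfalso
      have : d * d ≤ k * k := by nlinarith
      omega

lemma is_prime_alt_eq (i : Int) : is_prime_alt i = decide (2 ≤ i ∧ i.toNat.Prime) := by
  unfold is_prime_alt
  by_cases h2 : i < 2
  · simp [h2, show ¬(2 ≤ i) by omega]
  · rw [if_neg h2]
    have hi : ((i.toNat : Int)) = i := by omega
    rw [Bool.eq_iff_iff, is_prime_alt_loop_eq (i.toNat+1) i 2 le_rfl (by omega),
      decide_eq_true_iff]
    constructor
    · intro h
      refine ⟨by omega, ?_⟩
      rw [Nat.prime_def_le_sqrt]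
      refine ⟨by omega, fun m hm2 hms hdvd => ?_⟩
      have hk : ((m : Int)) ∣ i := by rw [← hi]; exact_mod_cast hdvd
      have hmm : m * m ≤ i.toNat := Nat.le_sqrt.mp hms
      refine h m (by exact_mod_cast hm2) ?_ hk
      calc ((m : Int)) * m = ((m * m : Nat) : Int) := by push_cast; ring
        _ ≤ ((i.toNat : Int)) := by exact_mod_cast hmm
        _ = i := hi
    · rintro ⟨h2', hp⟩ k hk hkk hdvd
      have hk0 : (0 : Int) ≤ k := by omega
      have hdn : k.toNat ∣ i.toNat := by
        rw [← Int.natCast_dvd_natCast, Int.toNat_of_nonneg hk0, hi]; exact hdvd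
      refine (Nat.prime_def_le_sqrt.mp hp).2 k.toNat (by omega) ?_ hdn
      rw [Nat.le_sqrt]
      have h1 : ((k.toNat * k.toNat : Nat) : Int) ≤ ((i.toNat : Int)) := by
        push_cast
        rw [Int.toNat_of_nonneg hk0, hi]
        exact hkk
      exact_mod_cast h1

lemma find?_pyRange_eq_some {q : Int → Bool} {b m : Int} :
    ∀ (t : Nat) (a : Int), (m - a).toNat = t → a ≤ m → m < b →
    q m = true → (∀ x, a ≤ x → x < m → q x = false) →
    (PySem.List.pyRange a b).find? q = some m := by
  intro t
  induction t with
  | zero =>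
    intro a ht ham hmb hm _
    have : a = m := by omega
    subst this
    rw [PySem.List.pyRange_one_cons (by omega)]
    exact List.find?_cons_of_pos (p := q) hm
  | succ t ih =>
    intro a ht ham hmb hm hlt
    have ha : a < m := by omega
    rw [PySem.List.pyRange_one_cons (by omega)]
    rw [List.find?_cons_of_neg (by simp [hlt a le_rfl ha])]
    exact ih (a+1) (by omega) (by omega) hmb hm (fun x hx1 hx2 => hlt x (by omega) hx2)

lemma find_minFac (n : Int) (hn : 2 ≤ n) :
    (PySem.List.pyRange 2 (n+1)).find? (fun i => is_prime i != 0 && PySem.Int.mod n i == 0)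
      = some (n.toNat.minFac : Int) := by
  have hn1 : n.toNat ≠ 1 := by omega
  have pp : n.toNat.minFac.Prime := Nat.minFac_prime hn1
  have pd : n.toNat.minFac ∣ n.toNat := Nat.minFac_dvd _
  have ple : n.toNat.minFac ≤ n.toNat := Nat.minFac_le (by omega)
  have hi : ((n.toNat : Int)) = n := by omega
  have hp2 : (2 : Int) ≤ (n.toNat.minFac : Int) := by exact_mod_cast pp.two_le
  apply find?_pyRange_eq_some ((n.toNat.minFac : Int) - 2).toNat 2 rfl hp2 (by omega)
  · have h1 : ((n.toNat.minFac : Int)) ∣ n := by rw [← hi]; exact_mod_cast pd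
    simp [is_prime_eq, PySem.Int.mod_eq_zero_iff_dvd, h1, pp, hp2]
  · intro x hx1 hx2
    by_cases hx : PySem.Int.mod n x = 0
    · exfalso
      rw [PySem.Int.mod_eq_zero_iff_dvd] at hx
      have hxd : x.toNat ∣ n.toNat := by
        rw [← Int.natCast_dvd_natCast, Int.toNat_of_nonneg (by omega), hi]; exact hx
      have := Nat.minFac_le_of_dvd (by omega) hxd
      omega
    · simp [hx]
lemma prime_factors_fuel_eq (fuel : Nat) (n : Int) (h : n.toNat ≤ fuel) :
    prime_factors_fuel fuel n = n.toNat.primeFactorsList.map (fun p : Nat => (p : Int)) := by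
  induction fuel generalizing n with
  | zero =>
    rw [show n.toNat = 0 by omega]
    simp [prime_factors_fuel, Nat.primeFactorsList_zero]
  | succ fuel ih =>
    by_cases hn2 : 2 ≤ n
    · rw [prime_factors_fuel, find_minFac n hn2]
      have hi : ((n.toNat : Int)) = n := by omega
      obtain ⟨k, hk⟩ : ∃ k, n.toNat = k + 2 := ⟨n.toNat - 2, by omega⟩
      have hfl : n.toNat.primeFactorsList
          = n.toNat.minFac :: (n.toNat / n.toNat.minFac).primeFactorsList := by
        rw [hk]; exact Nat.primeFactorsList_add_two k
      rw [hfl]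
      simp only [List.map_cons]
      have hp2 : 2 ≤ n.toNat.minFac := (Nat.minFac_prime (by omega)).two_le
      have hfd : PySem.Int.floordiv n ((n.toNat.minFac : Nat) : Int)
          = ((n.toNat / n.toNat.minFac : Nat) : Int) := by
        rw [PySem.Int.floordiv_eq_ediv_of_pos (by exact_mod_cast Nat.lt_of_lt_of_le Nat.zero_lt_two hp2),
          ← hi]
        norm_cast
      rw [hfd]
      congr 1
      apply ih
      have : n.toNat / n.toNat.minFac < n.toNat := Nat.div_lt_self (by omega) (by omega)
      simp only [Int.toNat_natCast]
      omega
    · rw [prime_factors_fuel, PySem.List.pyRange_one_eq_nil (by omega)]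
      simp only [List.find?_nil]
      have : n.toNat = 0 ∨ n.toNat = 1 := by omega
      rcases this with h0 | h1
      · rw [h0]; simp [Nat.primeFactorsList_zero]
      · rw [h1]; simp [Nat.primeFactorsList_one]
lemma prime_factors_eq (n : Int) :
    prime_factors n = n.toNat.primeFactorsList.map (fun p : Nat => (p : Int)) :=
  prime_factors_fuel_eq _ _ le_rfl

-- trimming: the enumerate/find?/slice tail of A is reverse∘dropWhile(==0)∘reverse
lemma trim_eq (x : List Int) : ∀ (s : Nat),
    (match (PySem.List.enumerate x (s : Int)).find? (fun kj => kj.2 != 0) with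
     | some kj => x.drop (kj.1.toNat - s)
     | none => ([] : List Int)) = x.dropWhile (fun j => j == 0) := by
  induction x with
  | nil => intro s; simp [PySem.List.enumerate]
  | cons a x ih =>
    intro s
    rw [PySem.List.enumerate_cons]
    by_cases ha : a = 0
    · rw [List.find?_cons_of_neg (by simp [ha])]
      have hcast : (s : Int) + 1 = ((s + 1 : Nat) : Int) := by push_cast; ring
      rw [hcast]
      have hih := ih (s+1)
      rw [List.dropWhile_cons]
      simp only [ha, beq_self_eq_true, if_true]
      rcases h : (PySem.List.enumerate x ((s+1 : Nat) : Int)).find? (fun kj => kj.2 != 0)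
        with _ | kj
      · simp only [h] at hih ⊢
        exact hih
      · simp only [h] at hih ⊢
        have hmem := List.mem_of_find?_eq_some h
        rw [PySem.List.mem_enumerate_iff] at hmem
        obtain ⟨k, hk, hkj⟩ := hmem
        have h1 : kj.1 = ((s+1 : Nat) : Int) + (k : Int) := by rw [hkj]
        have h2 : kj.1.toNat - s = (kj.1.toNat - (s+1)) + 1 := by omega
        rw [h2, List.drop_succ_cons]
        exact hih
    · rw [List.find?_cons_of_pos (by simp [ha])]
      simp only [Int.toNat_natCast, Nat.sub_self, List.drop_zero]
      rw [List.dropWhile_cons]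
      simp [ha]
lemma inner_spec (fuel : Nat) (m d : Int) (e : PySem.Dict Int Int) (hd : 2 ≤ d) (hm : 1 ≤ m)
    (hfuel : m.toNat ≤ fuel) :
    ∃ k : Nat,
      d.toNat ^ k ∣ m.toNat ∧ ¬ d.toNat ^ (k+1) ∣ m.toNat ∧
      (b_inner fuel m d e).1 = ((m.toNat / d.toNat ^ k : Nat) : Int) ∧
      (∀ q : Int, (b_inner fuel m d e).2.getD q 0 = e.getD q 0 + (if q = d then (k : Int) else 0)) ∧
      (∀ q : Int, q ∈ (b_inner fuel m d e).2.keys ↔ q ∈ e.keys ∨ (q = d ∧ k ≠ 0)) := by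
  induction fuel generalizing m e with
  | zero => omega
  | succ fuel ih =>
    have hmc : ((m.toNat : Int)) = m := by omega
    have hdc : (0 : Int) < d := by omega
    by_cases hdvd : PySem.Int.mod m d = 0
    · rw [PySem.Int.mod_eq_zero_iff_dvd] at hdvd
      have hdn : d.toNat ∣ m.toNat := by
        rw [← Int.natCast_dvd_natCast, Int.toNat_of_nonneg (by omega : (0:Int) ≤ d), hmc]
        exact hdvd
      have hdm : d ≤ m := Int.le_of_dvd (by omega) hdvd
      have hfd : PySem.Int.floordiv m d = ((m.toNat / d.toNat : Nat) : Int) := by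
        rw [PySem.Int.floordiv_eq_ediv_of_pos hdc, ← hmc,
          ← Int.toNat_of_nonneg (by omega : (0:Int) ≤ d)]
        norm_cast
      have hm' : (1 : Int) ≤ ((m.toNat / d.toNat : Nat) : Int) := by
        have : 1 ≤ m.toNat / d.toNat := (Nat.one_le_div_iff (by omega)).mpr (by omega)
        exact_mod_cast this
      have hlt : m.toNat / d.toNat < m.toNat := Nat.div_lt_self (by omega) (by omega)
      have hstep : b_inner (fuel+1) m d e
          = b_inner fuel (PySem.Int.floordiv m d) d (e.insert d (e.getD d 0 + 1)) := by
        rw [b_inner]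
        rw [if_pos (by rw [beq_iff_eq, PySem.Int.mod_eq_zero_iff_dvd]; exact hdvd)]
      have hM' : (PySem.Int.floordiv m d).toNat = m.toNat / d.toNat := by
        rw [hfd]; exact Int.toNat_natCast _
      obtain ⟨k, hk1, hk2, hk3, hk4, hk5⟩ :=
        ih (PySem.Int.floordiv m d) (e.insert d (e.getD d 0 + 1))
          (by rw [hfd]; exact hm') (by rw [hM']; omega)
      rw [hM'] at hk1 hk2 hk3
      have hD2 : 2 ≤ d.toNat := by omega
      have hM : m.toNat = d.toNat * (m.toNat / d.toNat) := (Nat.mul_div_cancel' hdn).symm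
      refine ⟨k+1, ?_, ?_, ?_, ?_, ?_⟩
      · rw [hM, pow_succ']
        exact mul_dvd_mul_left d.toNat hk1
      · intro hc
        apply hk2
        rw [hM] at hc
        rw [show k+1+1 = (k+1)+1 from rfl, pow_succ'] at hc
        exact (Nat.mul_dvd_mul_iff_left (show 0 < d.toNat by omega)).mp hc
      · rw [hstep, hk3, Nat.div_div_eq_div_mul, ← pow_succ']
      · intro q
        rw [hstep, hk4 q, PySem.Dict.getD_insert]
        by_cases hq : q = d
        · simp only [hq, if_true]; push_cast; ring
        · simp only [hq, if_false]
      · intro q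
        rw [hstep, hk5 q, PySem.Dict.mem_keys_insert]
        constructor
        · rintro (⟨h | h⟩ | ⟨h, _⟩)
          · exact Or.inr ⟨h, by omega⟩
          · exact Or.inl h
          · exact Or.inr ⟨h, by omega⟩
        · rintro (h | ⟨h, _⟩)
          · exact Or.inl (Or.inr h)
          · exact Or.inl (Or.inl h)
    · refine ⟨0, by simp, ?_, ?_, ?_, ?_⟩
      · rw [pow_one]
        intro hc
        apply hdvd
        rw [PySem.Int.mod_eq_zero_iff_dvd, ← hmc,
          ← Int.toNat_of_nonneg (by omega : (0:Int) ≤ d)]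
        exact_mod_cast hc
      · have : b_inner (fuel+1) m d e = (m, e) := by
          rw [b_inner, if_neg (by simpa using hdvd)]
        rw [this, pow_zero, Nat.div_one]
        exact hmc.symm
      · intro q
        have : b_inner (fuel+1) m d e = (m, e) := by
          rw [b_inner, if_neg (by simpa using hdvd)]
        rw [this]
        simp
      · intro q
        have : b_inner (fuel+1) m d e = (m, e) := by
          rw [b_inner, if_neg (by simpa using hdvd)]
        rw [this]
        simp
-- the net effect of the final "if m > 1: exps[m] += 1" applied to a result (mf, ef)
lemma outer_base (m d : Int) (e : PySem.Dict Int Int) (hd : 2 ≤ d) (hm : 1 ≤ m)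
    (hinv : ∀ p : Nat, p.Prime → p ∣ m.toNat → d.toNat ≤ p)
    (hsmall : m < d * d) :
    (∀ q : Int,
      (if 1 < m then e.insert m (e.getD m 0 + 1) else e).getD q 0
        = e.getD q 0 + (m.toNat.factorization q.toNat : Int)) ∧
    (∀ q : Int,
      q ∈ (if 1 < m then e.insert m (e.getD m 0 + 1) else e).keys
        ↔ q ∈ e.keys ∨ (2 ≤ q ∧ q.toNat.Prime ∧ q.toNat ∣ m.toNat)) := by
  have hmc : ((m.toNat : Int)) = m := by omega
  by_cases hm1 : 1 < m
  · have hm2 : 2 ≤ m.toNat := by omega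
    have mp : m.toNat.Prime := by
      by_contra hnp
      have hmf := Nat.minFac_sq_le_self (show 0 < m.toNat by omega) hnp
      have hpp := Nat.minFac_prime (show m.toNat ≠ 1 by omega)
      have hle := hinv _ hpp (Nat.minFac_dvd _)
      have hdd : d.toNat * d.toNat ≤ m.toNat := by
        calc d.toNat * d.toNat ≤ m.toNat.minFac * m.toNat.minFac := Nat.mul_le_mul hle hle
          _ = m.toNat.minFac ^ 2 := (pow_two _).symm
          _ ≤ m.toNat := hmf
      have hdc : ((d.toNat : Int)) = d := by omega
      have hcast : ((m.toNat : Int)) < ((d.toNat * d.toNat : Nat) : Int) := by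
        push_cast
        rw [hmc, hdc]
        exact hsmall
      have : m.toNat < d.toNat * d.toNat := by exact_mod_cast hcast
      omega
    rw [if_pos hm1]
    constructor
    · intro q
      rw [PySem.Dict.getD_insert, mp.factorization]
      rw [Finsupp.single_apply]
      by_cases hq : q = m
      · have : m.toNat = q.toNat := by omega
        simp [hq, this]
      · have : ¬ m.toNat = q.toNat := by omega
        simp [hq, this]
    · intro q
      rw [PySem.Dict.mem_keys_insert]
      constructor
      · rintro (rfl | h)
        · exact Or.inr ⟨by omega, mp, dvd_refl _⟩
        · exact Or.inl h
      · rintro (h | ⟨hq2, hqp, hqd⟩)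
        · exact Or.inr h
        · left
          rcases (Nat.Prime.eq_one_or_self_of_dvd mp _ hqd) with h1 | h1
        -- q.toNat prime so q.toNat ≠ 1, hence q.toNat = m.toNat and q = m
          · exact absurd h1 hqp.ne_one
          · omega
  · have hm1' : m = 1 := by omega
    rw [if_neg hm1]
    subst hm1'
    constructor
    · intro q
      simp [Nat.factorization_one]
    · intro q
      constructor
      · exact Or.inl
      · rintro (h | ⟨hq2, hqp, hqd⟩)
        · exact h
        · exact absurd (Nat.eq_one_of_dvd_one (by simpa using hqd)) hqp.ne_one

lemma outer_spec (fuel : Nat) : ∀ (m d : Int) (e : PySem.Dict Int Int), 2 ≤ d → 1 ≤ m →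
    (∀ p : Nat, p.Prime → p ∣ m.toNat → d.toNat ≤ p) →
    m.toNat + 2 ≤ fuel + d.toNat →
    (∀ q : Int,
      (if 1 < (b_outer fuel m d e).1 then
          (b_outer fuel m d e).2.insert (b_outer fuel m d e).1
            ((b_outer fuel m d e).2.getD (b_outer fuel m d e).1 0 + 1)
        else (b_outer fuel m d e).2).getD q 0
        = e.getD q 0 + (m.toNat.factorization q.toNat : Int)) ∧
    (∀ q : Int,
      q ∈ (if 1 < (b_outer fuel m d e).1 then
          (b_outer fuel m d e).2.insert (b_outer fuel m d e).1
            ((b_outer fuel m d e).2.getD (b_outer fuel m d e).1 0 + 1)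
        else (b_outer fuel m d e).2).keys
        ↔ q ∈ e.keys ∨ (2 ≤ q ∧ q.toNat.Prime ∧ q.toNat ∣ m.toNat)) := by
  induction fuel with
  | zero =>
    intro m d e hd hm hinv hfuel
    have hsmall : m < d * d := by
      have h1 : m < d := by omega
      have h2 : d ≤ d * d := le_mul_of_one_le_left (by omega) (by omega)
      omega
    exact outer_base m d e hd hm hinv hsmall
  | succ fuel ih =>
    intro m d e hd hm hinv hfuel
    by_cases hdd : d * d ≤ m
    · rw [show b_outer (fuel+1) m d e
          = b_outer fuel (b_inner m.toNat m d e).1 (d+1) (b_inner m.toNat m d e).2 from by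
        rw [b_outer, if_pos hdd]]
      obtain ⟨k, hk1, hk2, hk3, hk5, hk6⟩ := inner_spec m.toNat m d e hd hm le_rfl
      have hD2 : 2 ≤ d.toNat := by omega
      have hM1 : 1 ≤ m.toNat := by omega
      have hMeq : m.toNat = d.toNat ^ k * (m.toNat / d.toNat ^ k) :=
        (Nat.mul_div_cancel' hk1).symm
      have hm'toNat : (b_inner m.toNat m d e).1.toNat = m.toNat / d.toNat ^ k := by
        rw [hk3]; exact Int.toNat_natCast _
      have hm'pos : 1 ≤ m.toNat / d.toNat ^ k :=
        (Nat.one_le_div_iff (Nat.pos_of_ne_zero (pow_ne_zero k (by omega)))).mpr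
          (Nat.le_of_dvd (by omega) hk1)
      have hm'1 : (1 : Int) ≤ (b_inner m.toNat m d e).1 := by
        rw [hk3]; exact_mod_cast hm'pos
      have hm'dvd : m.toNat / d.toNat ^ k ∣ m.toNat := Dvd.intro_left _ hMeq.symm
      have hnotd : ¬ d.toNat ∣ m.toNat / d.toNat ^ k := by
        intro hc
        apply hk2
        calc d.toNat ^ (k+1) = d.toNat ^ k * d.toNat := pow_succ _ _
          _ ∣ d.toNat ^ k * (m.toNat / d.toNat ^ k) := mul_dvd_mul_left _ hc
          _ = m.toNat := hMeq.symm
      have hd1 : (d+1).toNat = d.toNat + 1 := by omega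
      have hinv' : ∀ p : Nat, p.Prime → p ∣ (b_inner m.toNat m d e).1.toNat
          → (d+1).toNat ≤ p := by
        intro p hp hpd
        rw [hm'toNat] at hpd
        have h1 : d.toNat ≤ p := hinv p hp (hpd.trans hm'dvd)
        have h2 : p ≠ d.toNat := by
          rintro rfl
          exact hnotd hpd
        omega
      have hfuel' : (b_inner m.toNat m d e).1.toNat + 2 ≤ fuel + (d+1).toNat := by
        rw [hm'toNat, hd1]
        have : m.toNat / d.toNat ^ k ≤ m.toNat := Nat.div_le_self _ _
        omega
      obtain ⟨post1, post2⟩ := ih (b_inner m.toNat m d e).1 (d+1) (b_inner m.toNat m d e).2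
        (by omega) hm'1 hinv' hfuel'
      by_cases hDp : d.toNat.Prime
      · have hfac : ∀ t : Nat, m.toNat.factorization t
            = (if d.toNat = t then k else 0) + (m.toNat / d.toNat ^ k).factorization t := by
          intro t
          conv_lhs => rw [hMeq]
          rw [Nat.factorization_mul (pow_ne_zero k (by omega)) (by omega),
            hDp.factorization_pow]
          simp [Finsupp.single_apply]
        constructor
        · intro q
          rw [post1 q, hk5 q, hfac q.toNat, hm'toNat]
          have hiff : (q = d) ↔ (d.toNat = q.toNat) := by omega
          by_cases hq : q = d
          · rw [if_pos hq, if_pos (hiff.mp hq)]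
            push_cast
            ring
          · rw [if_neg hq, if_neg (fun h => hq (hiff.mpr h))]
            push_cast
            ring
        · intro q
          rw [post2 q, hk6 q, hm'toNat]
          constructor
          · rintro ((h | ⟨rfl, hk0⟩) | ⟨hq2, hqp, hqd⟩)
            · exact Or.inl h
            · exact Or.inr ⟨by omega, hDp,
                (dvd_pow_self _ hk0).trans (Dvd.intro _ hMeq.symm)⟩
            · exact Or.inr ⟨hq2, hqp, hqd.trans hm'dvd⟩
          · rintro (h | ⟨hq2, hqp, hqd⟩)
            · exact Or.inl (Or.inl h)
            · by_cases hq : q = d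
              · subst hq
                have hkfac : k = m.toNat.factorization q.toNat := by
                  have hle := (hDp.pow_dvd_iff_le_factorization (by omega)).mp hk1
                  have hlt : ¬ (k + 1 ≤ m.toNat.factorization q.toNat) := fun hc =>
                    hk2 ((hDp.pow_dvd_iff_le_factorization
                      (show m.toNat ≠ 0 by omega)).mpr hc)
                  omega
                have hpos := hDp.factorization_pos_of_dvd (show m.toNat ≠ 0 by omega) hqd
                exact Or.inl (Or.inr ⟨rfl, by omega⟩)
              · right
                refine ⟨hq2, hqp, ?_⟩
                have hqD : q.toNat ≠ d.toNat := by omega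
                rcases (Nat.Prime.dvd_mul hqp).mp (hMeq ▸ hqd) with hc | hc
                · exact absurd ((Nat.prime_dvd_prime_iff_eq hqp hDp).mp
                    (hqp.dvd_of_dvd_pow hc)) hqD
                · exact hc
      · have hnd : ¬ d.toNat ∣ m.toNat := by
          intro hc
          have hpp := Nat.minFac_prime (show d.toNat ≠ 1 by omega)
          have h1 := hinv _ hpp ((Nat.minFac_dvd _).trans hc)
          have h2 := Nat.minFac_le (show 0 < d.toNat by omega)
          have : d.toNat.minFac = d.toNat := by omega
          exact hDp (this ▸ hpp)
        have hk0 : k = 0 := by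
          by_contra hkk
          exact hnd ((dvd_pow_self d.toNat hkk).trans hk1)
        subst hk0
        rw [pow_zero, Nat.div_one] at hm'toNat
        constructor
        · intro q
          rw [post1 q, hk5 q, hm'toNat]
          simp
        · intro q
          rw [post2 q, hk6 q, hm'toNat]
          tauto
    · rw [show b_outer (fuel+1) m d e = (m, e) from by rw [b_outer, if_neg hdd]]
      exact outer_base m d e hd hm hinv (not_le.mp hdd)

-- A's match-on-find? tail, in closed form
lemma trim_rev_eq (x : List Int) :
    (match (PySem.List.enumerate x).find? (fun kj => kj.2 != 0) with
     | some kj => (x.drop kj.1.toNat).reverse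
     | none => ([] : List Int)) = (x.dropWhile (fun j => j == 0)).reverse := by
  have h := trim_eq x 0
  simp only [Nat.cast_zero, Nat.sub_zero] at h
  rcases hf : (PySem.List.enumerate x).find? (fun kj => kj.2 != 0) with _ | kj
  · simp only [hf] at h ⊢
    rw [← h, List.reverse_nil]
  · simp only [hf] at h ⊢
    rw [h]

-- A in closed form: exponents for every prime up to n, with trailing zeros trimmed
lemma A_eq (n : Int) : prime_factor_exponents n
    = ((((PySem.List.pyRange 0 (n+1)).filter (fun i => decide (2 ≤ i ∧ i.toNat.Prime))).map
        (fun i => (n.toNat.factorization i.toNat : Int))).reverse.dropWhile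
          (fun j => j == 0)).reverse := by
  simp only [prime_factor_exponents]
  rw [show ∀ acc : List Int, (PySem.List.pyRange 0 (n+1)).foldl
      (fun r i => if is_prime i != 0 then r ++ [(PySem.List.count (prime_factors n) i : Int)]
        else r) acc = acc ++ ((PySem.List.pyRange 0 (n+1)).filter (fun i => is_prime i != 0)).map
          (fun i => (PySem.List.count (prime_factors n) i : Int)) from
    fun acc => PySem.List.foldl_append_if _ _ _ acc]
  rw [List.nil_append]
  rw [List.filter_congr (fun x _ => is_prime_eq x)]
  rw [List.map_congr_left (fun i hi => ?_), trim_rev_eq]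
  have hi' := (List.mem_filter.mp hi).2
  rw [decide_eq_true_iff] at hi'
  rw [prime_factors_eq, PySem.List.count_eq, ← Int.toNat_of_nonneg (by omega : (0:Int) ≤ i),
    List.count_map_of_injective _ _ (fun a b => by omega),
    Nat.primeFactorsList_count_eq, Int.toNat_natCast]

-- B in closed form, together with what its `biggest` is
lemma B_eq (n : Int) (hn : 2 ≤ n) : ∃ L : Int, 2 ≤ L ∧ L.toNat.Prime ∧ L.toNat ∣ n.toNat ∧
    (∀ p : Nat, p.Prime → p ∣ n.toNat → (p : Int) ≤ L) ∧
    prime_factor_exponents_alt n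
      = ((PySem.List.pyRange 2 (L+1)).filter (fun i => decide (2 ≤ i ∧ i.toNat.Prime))).map
          (fun i => (n.toNat.factorization i.toNat : Int)) := by
  have hnotlt : ¬ n < 2 := by omega
  obtain ⟨post1, post2⟩ := outer_spec (n.toNat+1) n 2 PySem.Dict.empty le_rfl (by omega)
    (fun p hp _ => by simpa using hp.two_le) (by omega)
  simp only [PySem.Dict.getD_empty, zero_add] at post1
  simp only [PySem.Dict.keys_empty, List.not_mem_nil, false_or] at post2
  set B := b_outer (n.toNat+1) n 2 PySem.Dict.empty with hB
  set F := (if 1 < B.1 then B.2.insert B.1 (B.2.getD B.1 0 + 1) else B.2) with hF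
  obtain ⟨p0, hp0, hp0d⟩ := Nat.exists_prime_and_dvd (show n.toNat ≠ 1 by omega)
  have hkeysne : ((p0 : Int)) ∈ F.keys := by
    rw [post2]
    exact ⟨by exact_mod_cast hp0.two_le, by simpa using hp0, by simpa using hp0d⟩
  rcases hmax : PySem.List.max? F.keys (fun x => x) with _ | L
  · rw [PySem.List.max?_eq_none_iff] at hmax
    rw [hmax] at hkeysne
    cases hkeysne
  · have hLmem := PySem.List.max?_mem hmax
    have hLmax := PySem.List.max?_isMax hmax
    rw [post2 L] at hLmem
    obtain ⟨hL2, hLp, hLd⟩ := hLmem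
    refine ⟨L, hL2, hLp, hLd, fun p hp hpd => ?_, ?_⟩
    · have hmem : ((p : Int)) ∈ F.keys := by
        rw [post2]
        exact ⟨by exact_mod_cast hp.two_le, by simpa using hp, by simpa using hpd⟩
      exact hLmax _ hmem
    · show (if n < 2 then ([] : List Int) else
        match PySem.List.max? F.keys (fun x => x) with
        | some biggest => (PySem.List.pyRange 2 (biggest+1)).foldl
            (fun out i => if is_prime_alt i then out ++ [F.getD i 0] else out) []
        | none => []) = _
      rw [if_neg hnotlt, hmax]
      show (PySem.List.pyRange 2 (L+1)).foldl
          (fun out i => if is_prime_alt i then out ++ [F.getD i 0] else out) [] = _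
      rw [show ∀ acc : List Int, (PySem.List.pyRange 2 (L+1)).foldl
          (fun out i => if is_prime_alt i then out ++ [F.getD i 0] else out) acc
          = acc ++ ((PySem.List.pyRange 2 (L+1)).filter (fun i => is_prime_alt i)).map
            (fun i => F.getD i 0) from fun acc => PySem.List.foldl_append_if _ _ _ acc]
      rw [List.nil_append, List.filter_congr (fun x _ => is_prime_alt_eq x)]
      exact List.map_congr_left (fun i _ => post1 i)

lemma main_eq (n : Int) : prime_factor_exponents n = prime_factor_exponents_alt n := by
  by_cases hn : 2 ≤ n
  · rw [A_eq n]
    obtain ⟨L, hL2, hLp, hLd, hLmax, hBeq⟩ := B_eq n hn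
    rw [hBeq]
    have hN2 : 2 ≤ n.toNat := by omega
    have hLn : L ≤ n := by
      have := Nat.le_of_dvd (by omega) hLd
      omega
    rw [PySem.List.pyRange_one_append 0 2 (n+1) (by omega) (by omega),
      PySem.List.pyRange_one_append 2 (L+1) (n+1) (by omega) (by omega),
      List.filter_append, List.filter_append, List.map_append, List.map_append]
    rw [show (PySem.List.pyRange 0 2).filter (fun i => decide (2 ≤ i ∧ i.toNat.Prime)) = []
      from by decide]
    rw [List.map_nil, List.nil_append]
    rw [PySem.List.pyRange_one_append 2 L (L+1) (by omega) (by omega),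
      List.filter_append, List.map_append]
    rw [show PySem.List.pyRange L (L+1) = [L] from PySem.List.pyRange_one_cons (by omega) |>.trans
      (by rw [PySem.List.pyRange_one_eq_nil (by omega)])]
    rw [show List.filter (fun i => decide (2 ≤ i ∧ i.toNat.Prime)) [L] = [L] from by
      simp [hL2, hLp]]
    rw [List.map_singleton]
    rw [List.reverse_append, List.reverse_append, List.dropWhile_append]
    rw [show (((PySem.List.pyRange (L+1) (n+1)).filter
        (fun i => decide (2 ≤ i ∧ i.toNat.Prime))).map
          (fun i => (n.toNat.factorization i.toNat : Int))).reverse.dropWhile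
            (fun j => j == 0) = [] from ?_]
    · have hfLpos : 0 < n.toNat.factorization L.toNat :=
        hLp.factorization_pos_of_dvd (by omega) hLd
      rw [List.isEmpty_nil, if_pos rfl, List.reverse_singleton, List.singleton_append,
        List.dropWhile_cons]
      rw [if_neg (by simp; omega)]
      rw [List.reverse_cons, List.reverse_reverse]
    · rw [List.dropWhile_eq_nil_iff]
      intro x hx
      rw [List.mem_reverse, List.mem_map] at hx
      obtain ⟨i, hi, rfl⟩ := hx
      rw [List.mem_filter, PySem.List.mem_pyRange_one, decide_eq_true_iff] at hi
      obtain ⟨⟨hiL, _⟩, hi2, hip⟩ := hi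
      have hnd : ¬ i.toNat ∣ n.toNat := by
        intro hc
        have := hLmax i.toNat hip hc
        rw [Int.toNat_of_nonneg (by omega)] at this
        omega
      rw [Nat.factorization_eq_zero_of_not_dvd hnd]
      simp
  · rw [A_eq n]
    rw [show (PySem.List.pyRange 0 (n+1)).filter (fun i => decide (2 ≤ i ∧ i.toNat.Prime)) = []
      from ?_]
    · simp only [prime_factor_exponents_alt, if_pos (show n < 2 by omega)]
      simp
    · rw [List.filter_eq_nil_iff]
      intro i hi
      rw [PySem.List.mem_pyRange_one] at hi
      simp only [decide_eq_true_iff, not_and]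
      omega

-- ===== VERDICT (by name: the statement is the Claim_ definition above) =====
theorem prime_factor_exponents_spec : Claim_equal_prime_factor_exponents := by
  intro n _
  unfold Spec_prime_factor_exponents
  exact main_eq n
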